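-- pv_equiv track=rewrite | github.com/N0I0C0K/leetcode_saved | 1584.py | minCostConnectPoints
-- ===== SOURCE A (Python) =====
-- from typing import List
--
-- def minCostConnectPoints(points: List[List[int]]) -> int:
--     dist = lambda x, y: abs(points[x][0] - points[y][0]) + abs(points[x][1] - points[y][1])
--     len_p = len(points)
--     res = list(range(len_p))
--     dis = []
--     rank = [1]*len_p
--
--     def find(x:int):
--         if res[x] == x:
--             return x
--         res[x] = find(res[x])
--         return res[x]
--
--     def union(x, y)->bool:
--         fx, fy = find(x), find(y)
--         if fx == fy:
--             return False
--         if rank[fx] < rank[fy]: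
--             fx, fy = fy, fx
--         rank[fx] += rank[fy]
--         res[fy] = fx
--         return True
--
--     for i in range(len_p):
--         for j in range(i+1, len_p):
--             dis.append((dist(i, j), i, j))
--
--     dis.sort()
--     ret, nums = 0, 1
--     for length, x, y in dis:
--         if union(x,y):
--             ret += length
--             nums+=1
--             if nums == len_p:
--                 break
--     return ret
-- ===== SOURCE B (Python) =====
-- def minCostConnectPoints(points):
--     n = len(points)
--     edges = sorted(
--         (abs(points[i][0] - points[j][0]) + abs(points[i][1] - points[j][1]), i, j)
--         for i in range(n) for j in range(i + 1, n)
--     )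
--     comp = list(range(n))
--     total, used = 0, 1
--     for d, i, j in edges:
--         ci, cj = comp[i], comp[j]
--         if ci != cj:
--             for k in range(n):
--                 if comp[k] == cj:
--                     comp[k] = ci
--             total += d
--             used += 1
--             if used == n:
--                 break
--     return total
-- ===== Notes on version B (the rewrite author's own statement) =====
-- stated objective: simpler
-- what changed: Replaces the recursive path-compressing, rank-balanced union-find with a flat component-label array merged by a linear relabel scan (and builds the edge list as a sorted comprehension), removing recursion, ranks and path compression entirely.
import Mathlib
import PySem

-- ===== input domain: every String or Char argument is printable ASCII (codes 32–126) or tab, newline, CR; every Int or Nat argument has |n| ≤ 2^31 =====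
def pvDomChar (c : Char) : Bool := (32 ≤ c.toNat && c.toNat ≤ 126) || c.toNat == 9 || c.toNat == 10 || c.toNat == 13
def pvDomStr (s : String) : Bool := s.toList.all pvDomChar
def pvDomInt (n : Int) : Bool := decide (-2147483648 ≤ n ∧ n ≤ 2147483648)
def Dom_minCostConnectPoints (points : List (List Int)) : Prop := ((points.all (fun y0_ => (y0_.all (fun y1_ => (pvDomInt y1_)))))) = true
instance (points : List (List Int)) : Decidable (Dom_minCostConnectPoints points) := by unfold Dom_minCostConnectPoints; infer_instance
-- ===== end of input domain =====

-- B replaces A's recursive path-compressing, rank-balanced union-find by a flat component-label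
-- array merged with a linear relabel scan (objective: simpler — no recursion, no ranks, no
-- path compression); same O(n^2 log n) cost, dominated by the edge sort in both versions.

-- ===== PORT A =====

-- points[x][c] for in-range indices; Python raises exactly where pyGet? = none (excluded by Pre_)
def pvGet2 (points : List (List Int)) (r c : Int) : Int :=
  (((PySem.List.pyGet? points r).bind (fun row => PySem.List.pyGet? row c)).getD 0)

-- dist = lambda x, y: abs(points[x][0]-points[y][0]) + abs(points[x][1]-points[y][1])
def distA (points : List (List Int)) (x y : Int) : Int :=
  |pvGet2 points x 0 - pvGet2 points y 0| + |pvGet2 points x 1 - pvGet2 points y 1|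

-- def find(x): if res[x] == x: return x; res[x] = find(res[x]); return res[x]
-- (fuel bounds the recursion depth; fuel = len(points)+1 always suffices, see findA_spec)
def findA (res : List Int) (x : Int) : Nat → Int × List Int
  | 0 => (x, res)
  | fuel+1 =>
    let p := PySem.List.pyGetD res x 0
    if p = x then (x, res)
    else
      let rr := findA res p fuel
      (rr.1, PySem.List.pySetD rr.2 x rr.1)

-- def union(x, y): fx, fy = find(x), find(y); …
def unionA (res rank : List Int) (x y : Int) (fuel : Nat) : Bool × List Int × List Int :=
  let f1 := findA res x fuel
  let f2 := findA f1.2 y fuel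
  if f1.1 = f2.1 then (false, f2.2, rank)
  else
    let p := if PySem.List.pyGetD rank f1.1 0 < PySem.List.pyGetD rank f2.1 0
             then (f2.1, f1.1) else (f1.1, f2.1)
    (true,
     PySem.List.pySetD f2.2 p.2 p.1,
     PySem.List.pySetD rank p.1 (PySem.List.pyGetD rank p.1 0 + PySem.List.pyGetD rank p.2 0))

-- for length, x, y in dis: if union(x,y): ret += length; nums += 1; if nums == len_p: break
def loopA (n : Nat) : List (Int × Int × Int) → List Int → List Int → Int → Int → Int
  | [], _, _, ret, _ => ret
  | (d, x, y) :: rest, res, rank, ret, nums =>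
    let u := unionA res rank x y (n + 1)
    if u.1 then
      if nums + 1 = (n : Int) then ret + d
      else loopA n rest u.2.1 u.2.2 (ret + d) (nums + 1)
    else loopA n rest u.2.1 u.2.2 ret nums

def minCostConnectPoints (points : List (List Int)) : Int :=
  let len_p := points.length
  let res := PySem.List.pyRange 0 (len_p : Int) 1
  let rank := List.replicate len_p (1 : Int)
  let dis := (PySem.List.pyRange 0 (len_p : Int) 1).foldl (fun acc i =>
      (PySem.List.pyRange (i + 1) (len_p : Int) 1).foldl (fun acc2 j =>
        acc2 ++ [(distA points i j, i, j)]) acc) []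
  -- dis.sort(): Python's lexicographic tuple sort on (d, i, j); since 0 ≤ i, j < len_p the
  -- secondary key i*len_p + j orders the (i, j) pairs exactly lexicographically, so this is exact.
  let dis := PySem.List.sorted2 dis (fun t => t.1) (fun t => t.2.1 * (len_p : Int) + t.2.2)
  loopA len_p dis res rank 0 1

-- ===== PORT B =====

-- abs(points[i][0]-points[j][0]) + abs(points[i][1]-points[j][1])  (B's inline expression)
def distB (points : List (List Int)) (i j : Int) : Int :=
  |pvGet2 points i 0 - pvGet2 points j 0| + |pvGet2 points i 1 - pvGet2 points j 1|

-- for d, i, j in edges: ci, cj = comp[i], comp[j]; if ci != cj: relabel; total += d; used += 1; …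
def loopB (n : Nat) : List (Int × Int × Int) → List Int → Int → Int → Int
  | [], _, total, _ => total
  | (d, i, j) :: rest, comp, total, used =>
    let ci := PySem.List.pyGetD comp i 0
    let cj := PySem.List.pyGetD comp j 0
    if ci = cj then loopB n rest comp total used
    else
      -- for k in range(n): if comp[k] == cj: comp[k] = ci   (a single pass over comp)
      let comp' := comp.map (fun c => if c = cj then ci else c)
      if used + 1 = (n : Int) then total + d
      else loopB n rest comp' (total + d) (used + 1)

def minCostConnectPoints_alt (points : List (List Int)) : Int :=
  let n := points.length
  let edges := (PySem.List.pyRange 0 (n : Int) 1).flatMap (fun i =>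
      (PySem.List.pyRange (i + 1) (n : Int) 1).map (fun j => (distB points i j, i, j)))
  -- sorted(...) on the generated (d, i, j) triples; exact for the same reason as in port A
  let edges := PySem.List.sorted2 edges (fun t => t.1) (fun t => t.2.1 * (n : Int) + t.2.2)
  loopB n edges (PySem.List.pyRange 0 (n : Int) 1) 0 1

-- ===== PRECONDITION & SPEC =====

-- Python A raises IndexError iff it has ≥ 2 points and some point list has fewer than 2
-- coordinates (every pair is indexed [0] and [1] before the sort); with ≤ 1 points no
-- indexing happens and A returns 0.
def Pre_minCostConnectPoints (points : List (List Int)) : Prop :=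
  points.length ≤ 1 ∨ ∀ p ∈ points, 2 ≤ p.length
instance (points : List (List Int)) : Decidable (Pre_minCostConnectPoints points) := by
  unfold Pre_minCostConnectPoints; infer_instance

def pvWitness_minCostConnectPoints : List (List Int) := [[0, 0], [2, 2], [3, 10], [-1, 4]]

def Spec_minCostConnectPoints (points : List (List Int)) (out : Int) : Prop := out = minCostConnectPoints_alt points
instance (points : List (List Int)) (out : Int) : Decidable (Spec_minCostConnectPoints points out) := by unfold Spec_minCostConnectPoints; infer_instance

-- ===== CLAIM (what is proved, stated in full; the proofs are below) =====
def Claim_equal_minCostConnectPoints : Prop := ∀ (points : List (List Int)), Dom_minCostConnectPoints points → Pre_minCostConnectPoints points → Spec_minCostConnectPoints points (minCostConnectPoints points)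

-- ===== LEMMAS AND PROOFS =====

-- x is an in-range index of a list of length n
def InRg (n : Nat) (x : Int) : Prop := 0 ≤ x ∧ x < (n : Int)

-- the parent chain of x in the union-find array res, ending at its root r; l lists its nodes
inductive ChainU : List Int → Int → Int → List Int → Prop
  | root (res : List Int) (x : Int) (h : PySem.List.pyGetD res x 0 = x) : ChainU res x x [x]
  | step (res : List Int) (x r : Int) (l : List Int) (h : PySem.List.pyGetD res x 0 ≠ x)
      (hc : ChainU res (PySem.List.pyGetD res x 0) r l) : ChainU res x r (x :: l)

-- res is a well-formed union-find array on indices [0, n)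
def UFInv (n : Nat) (res : List Int) : Prop :=
  res.length = n ∧ (∀ x : Int, InRg n x → InRg n (PySem.List.pyGetD res x 0)) ∧
  (∀ x : Int, InRg n x → ∃ r l, ChainU res x r l)

def Rt (res : List Int) (x r : Int) : Prop := ∃ l, ChainU res x r l

def RootEq (res : List Int) (x y : Int) : Prop := ∃ r, Rt res x r ∧ Rt res y r

-- res' differs from res only by pointing some nodes directly at their own root
def POK (n : Nat) (res res' : List Int) : Prop :=
  res'.length = res.length ∧ ∀ k : Int, InRg n k →
    (PySem.List.pyGetD res' k 0 = PySem.List.pyGetD res k 0 ∨ Rt res k (PySem.List.pyGetD res' k 0))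

theorem chain_unique {res : List Int} {x r₁ r₂ : Int} {l₁ l₂ : List Int}
    (h₁ : ChainU res x r₁ l₁) (h₂ : ChainU res x r₂ l₂) : r₁ = r₂ ∧ l₁ = l₂ := by
  induction h₁ generalizing r₂ l₂ with
  | root x h =>
    cases h₂ with
    | root => exact ⟨rfl, rfl⟩
    | step => exact absurd h (by assumption)
  | step x r l h hc ih =>
    cases h₂ with
    | root => rename_i h'; exact absurd h' h
    | step =>
      rename_i hc₂
      obtain ⟨hr, hl⟩ := ih hc₂
      exact ⟨hr, by rw [hl]⟩

theorem chain_root_fix {res : List Int} {x r : Int} {l : List Int}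
    (h : ChainU res x r l) : PySem.List.pyGetD res r 0 = r := by
  induction h with
  | root x h => exact h
  | step x r l h hc ih => exact ih

theorem chain_mem_rg {n : Nat} {res : List Int} {x r : Int} {l : List Int}
    (hinv : UFInv n res) (hx : InRg n x) (h : ChainU res x r l) : ∀ v ∈ l, InRg n v := by
  revert hx
  induction h with
  | root x h =>
    intro hx v hv
    simp only [List.mem_singleton] at hv
    exact hv ▸ hx
  | step x r l h hc ih =>
    intro hx v hv
    rcases List.mem_cons.mp hv with hv | hv
    · exact hv ▸ hx
    · exact ih (hinv.2.1 x hx) v hv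

theorem chain_head_mem {res : List Int} {x r : Int} {l : List Int}
    (h : ChainU res x r l) : x ∈ l ∧ r ∈ l := by
  induction h with
  | root x h => exact ⟨List.mem_singleton_self x, List.mem_singleton_self x⟩
  | step x r l h hc ih => exact ⟨List.mem_cons_self, List.mem_cons_of_mem x ih.2⟩

theorem chain_suffix {res : List Int} {y r : Int} {l : List Int}
    (h : ChainU res y r l) : ∀ x ∈ l, ∃ l', ChainU res x r l' ∧ l'.IsSuffix l := by
  induction h with
  | root y h =>
    intro x hx
    simp only [List.mem_singleton] at hx
    exact ⟨[y], hx ▸ ChainU.root res y h, List.suffix_refl _⟩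
  | step y r l h hc ih =>
    intro x hx
    rcases List.mem_cons.mp hx with hx | hx
    · exact ⟨y :: l, hx ▸ ChainU.step res y r l h hc, List.suffix_refl _⟩
    · obtain ⟨l', hl', hs⟩ := ih x hx
      exact ⟨l', hl', hs.trans (List.suffix_cons y l)⟩

theorem chain_nodup {res : List Int} {x r : Int} {l : List Int}
    (h : ChainU res x r l) : l.Nodup := by
  induction h with
  | root x h => exact List.nodup_singleton x
  | step x r l h hc ih =>
    refine List.nodup_cons.mpr ⟨?_, ih⟩
    intro hx
    obtain ⟨l', hl', hs⟩ := chain_suffix hc x hx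
    obtain ⟨-, hl⟩ := chain_unique hl' (ChainU.step res x r l h hc)
    have := hs.length_le
    subst hl
    simp at this

theorem chain_length_le {n : Nat} {res : List Int} {x r : Int} {l : List Int}
    (hinv : UFInv n res) (hx : InRg n x) (h : ChainU res x r l) : l.length ≤ n := by
  have hmem := chain_mem_rg hinv hx h
  have hnd := chain_nodup h
  have hnd' : (l.map Int.toNat).Nodup := by
    refine List.Nodup.map_on ?_ hnd
    intro a ha b hb hab
    have h1 := (hmem a ha).1
    have h2 := (hmem b hb).1
    omega
  have hsub : (l.map Int.toNat).toFinset ⊆ Finset.range n := by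
    intro v hv
    simp only [List.mem_toFinset, List.mem_map] at hv
    obtain ⟨a, ha, rfl⟩ := hv
    have := hmem a ha
    simp only [Finset.mem_range]
    rcases this with ⟨h0, h1⟩
    omega
  have := Finset.card_le_card hsub
  rw [Finset.card_range, List.toFinset_card_of_nodup hnd'] at this
  simpa using this

-- pyGetD after pySetD, both indices nonnegative, set index in range
theorem pyGetD_pySetD' (xs : List Int) (k v m : Int) (hk0 : 0 ≤ k) (hk : k < (xs.length : Int))
    (hm : 0 ≤ m) (hm2 : m < (xs.length : Int)) :
    PySem.List.pyGetD (PySem.List.pySetD xs k v) m 0 = if m = k then v else PySem.List.pyGetD xs m 0 := by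
  rw [PySem.List.pySetD_of_nonneg xs hk0 (v := v)]
  rw [PySem.List.pyGetD_eq_getElem (xs.set k.toNat v) hm (by simpa using hm2) (d := (0:Int)),
      PySem.List.pyGetD_eq_getElem xs hm (by simpa using hm2) (d := (0:Int))]
  rw [List.getElem_set]
  by_cases h : m = k
  · subst h; simp
  · rw [if_neg (by omega), if_neg h]

theorem root_chain_eq {res : List Int} {x r : Int} {l : List Int}
    (hroot : PySem.List.pyGetD res x 0 = x) (h : ChainU res x r l) : r = x :=
  (chain_unique h (ChainU.root res x hroot)).1

theorem root_stays {n : Nat} {res res' : List Int} (hp : POK n res res')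
    {r : Int} (hr : InRg n r) (hroot : PySem.List.pyGetD res r 0 = r) :
    PySem.List.pyGetD res' r 0 = r := by
  rcases (hp.2 r hr) with h | ⟨l, hl⟩
  · rw [h, hroot]
  · exact root_chain_eq hroot hl

theorem roots_preserved {n : Nat} {res res' : List Int} (hinv : UFInv n res) (hp : POK n res res')
    {x r : Int} {l : List Int} (hx : InRg n x) (h : ChainU res x r l) : Rt res' x r := by
  revert hx
  induction h with
  | root x h =>
    intro hx
    exact ⟨[x], ChainU.root res' x (root_stays hp hx h)⟩
  | step x r l h hc ih =>
    intro hx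
    have hrx : r ≠ x := by
      intro hrx
      exact h (hrx ▸ chain_root_fix (ChainU.step _ x r l h hc))
    have hrr : PySem.List.pyGetD res r 0 = r := chain_root_fix hc
    have hrrg : InRg n r :=
      (chain_mem_rg hinv hx (ChainU.step _ x r l h hc)) r (chain_head_mem (ChainU.step _ x r l h hc)).2
    rcases (hp.2 x hx) with he | ⟨l₀, hl₀⟩
    · obtain ⟨l', hl'⟩ := ih (hinv.2.1 x hx)
      exact ⟨x :: l', ChainU.step res' x r l' (by rw [he]; exact h) (by rw [he]; exact hl')⟩
    · have : PySem.List.pyGetD res' x 0 = r :=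
        (chain_unique hl₀ (ChainU.step _ x r l h hc)).1
      refine ⟨x :: [r], ChainU.step res' x r [r] (by rw [this]; exact hrx) ?_⟩
      rw [this]
      exact ChainU.root res' r (root_stays hp hrrg hrr)

theorem rt_unique {res : List Int} {x r₁ r₂ : Int} (h₁ : Rt res x r₁) (h₂ : Rt res x r₂) :
    r₁ = r₂ := by
  obtain ⟨l₁, h₁⟩ := h₁; obtain ⟨l₂, h₂⟩ := h₂
  exact (chain_unique h₁ h₂).1

theorem rooteq_of_POK {n : Nat} {res res' : List Int} (hinv : UFInv n res) (hp : POK n res res') :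
    UFInv n res' ∧ (∀ x y : Int, InRg n x → InRg n y → (RootEq res' x y ↔ RootEq res x y)) := by
  have htot : ∀ x : Int, InRg n x → ∃ r, Rt res x r ∧ Rt res' x r := by
    intro x hx
    obtain ⟨r, l, hl⟩ := hinv.2.2 x hx
    exact ⟨r, ⟨l, hl⟩, roots_preserved hinv hp hx hl⟩
  constructor
  · refine ⟨hp.1.trans hinv.1, ?_, ?_⟩
    · intro x hx
      rcases hp.2 x hx with he | ⟨l, hl⟩
      · rw [he]; exact hinv.2.1 x hx
      · exact (chain_mem_rg hinv hx hl) _ (chain_head_mem hl).2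
    · intro x hx
      obtain ⟨r, -, ⟨l', hl'⟩⟩ := htot x hx
      exact ⟨r, l', hl'⟩
  · intro x y hx hy
    obtain ⟨rx, hrx, hrx'⟩ := htot x hx
    obtain ⟨ry, hry, hry'⟩ := htot y hy
    constructor
    · rintro ⟨r, hu, hv⟩
      have h1 := rt_unique hu hrx'
      have h2 := rt_unique hv hry'
      exact ⟨rx, hrx, by rw [← h1, h2]; exact hry⟩
    · rintro ⟨r, hu, hv⟩
      have h1 := rt_unique hu hrx
      have h2 := rt_unique hv hry
      exact ⟨rx, hrx', by rw [← h1, h2]; exact hry'⟩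

theorem POK_trans {n : Nat} {res res₁ res₂ : List Int} (hinv : UFInv n res)
    (h₁ : POK n res res₁) (h₂ : POK n res₁ res₂) : POK n res res₂ := by
  refine ⟨h₂.1.trans h₁.1, ?_⟩
  intro k hk
  rcases h₂.2 k hk with he | hrt
  · rw [he]; exact h₁.2 k hk
  · right
    obtain ⟨r, l, hl⟩ := hinv.2.2 k hk
    have hr1 : Rt res₁ k r := roots_preserved hinv h₁ hk hl
    have := rt_unique hrt hr1
    rw [this]
    exact ⟨l, hl⟩

theorem findA_spec {n : Nat} {res : List Int} {x r : Int} {l : List Int}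
    (hinv : UFInv n res) (hx : InRg n x) (h : ChainU res x r l) :
    ∀ fuel, l.length ≤ fuel →
      (findA res x fuel).1 = r ∧ POK n res (findA res x fuel).2 := by
  revert hx
  induction h with
  | root x h =>
    intro hx fuel hf
    obtain ⟨f, rfl⟩ : ∃ f, fuel = f + 1 := ⟨fuel - 1, by simp at hf; omega⟩
    rw [show findA res x (f + 1) = (x, res) by simp [findA, h]]
    exact ⟨rfl, rfl, fun k _ => Or.inl rfl⟩
  | step x r l h hc ih =>
    intro hx fuel hf
    obtain ⟨f, rfl⟩ : ∃ f, fuel = f + 1 := ⟨fuel - 1, by simp at hf; omega⟩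
    have hlf : l.length ≤ f := by simp at hf; omega
    have hp : InRg n (PySem.List.pyGetD res x 0) := hinv.2.1 x hx
    have ihf := ih hp f hlf
    simp only [findA, if_neg h]
    refine ⟨ihf.1, ?_⟩
    have hlen : (findA res (PySem.List.pyGetD res x 0) f).2.length = res.length := ihf.2.1
    have hlenn : (res.length : Int) = (n : Int) := by exact_mod_cast congrArg Nat.cast hinv.1
    refine ⟨by rw [PySem.List.length_pySetD, hlen], ?_⟩
    intro k hk
    rw [pyGetD_pySetD' _ x _ k hx.1 (by rw [hlen, hlenn]; exact hx.2) hk.1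
        (by rw [hlen, hlenn]; exact hk.2)]
    by_cases hkx : k = x
    · rw [if_pos hkx, ihf.1]
      subst hkx
      exact Or.inr ⟨k :: l, ChainU.step res k r l h hc⟩
    · rw [if_neg hkx]
      exact ihf.2.2 k hk

-- attaching root b under root a (a ≠ b): every root r becomes (if r = b then a else r)
theorem attach_chain {n : Nat} {res : List Int} {a b : Int} (hinv : UFInv n res)
    (hab : a ≠ b) (ha : InRg n a) (hb : InRg n b)
    (hra : PySem.List.pyGetD res a 0 = a) (hrb : PySem.List.pyGetD res b 0 = b)
    {x r : Int} {l : List Int} (hx : InRg n x) (h : ChainU res x r l) :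
    Rt (PySem.List.pySetD res b a) x (if r = b then a else r) := by
  have hlen : (res.length : Int) = (n : Int) := by exact_mod_cast congrArg Nat.cast hinv.1
  have hget : ∀ m : Int, InRg n m →
      PySem.List.pyGetD (PySem.List.pySetD res b a) m 0 =
        if m = b then a else PySem.List.pyGetD res m 0 := by
    intro m hm
    exact pyGetD_pySetD' res b a m hb.1 (by rw [hlen]; exact hb.2) hm.1 (by rw [hlen]; exact hm.2)
  revert hx
  induction h with
  | root x h =>
    intro hx
    by_cases hxb : x = b
    · subst hxb
      rw [if_pos rfl]
      refine ⟨[x, a], ChainU.step _ x a [a] ?_ ?_⟩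
      · rw [hget x ⟨hb.1, hb.2⟩, if_pos rfl]; exact hab
      · rw [hget x ⟨hb.1, hb.2⟩, if_pos rfl]
        exact ChainU.root _ a (by rw [hget a ha, if_neg hab]; exact hra)
    · rw [if_neg hxb]
      exact ⟨[x], ChainU.root _ x (by rw [hget x hx, if_neg hxb]; exact h)⟩
  | step x r l h hc ih =>
    intro hx
    have hxb : x ≠ b := by
      intro e
      exact h (by rw [e, hrb])
    have hp : InRg n (PySem.List.pyGetD res x 0) := hinv.2.1 x hx
    obtain ⟨l2, hl2⟩ := ih hp
    have he : PySem.List.pyGetD (PySem.List.pySetD res b a) x 0 = PySem.List.pyGetD res x 0 := by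
      rw [hget x hx, if_neg hxb]
    refine ⟨x :: l2, ChainU.step _ x _ l2 ?_ ?_⟩
    · rw [he]; exact h
    · rw [he]; exact hl2

theorem attach_spec {n : Nat} {res : List Int} {a b : Int} (hinv : UFInv n res)
    (hab : a ≠ b) (ha : InRg n a) (hb : InRg n b)
    (hra : PySem.List.pyGetD res a 0 = a) (hrb : PySem.List.pyGetD res b 0 = b) :
    UFInv n (PySem.List.pySetD res b a) ∧
    ∀ x y : Int, InRg n x → InRg n y →
      (RootEq (PySem.List.pySetD res b a) x y ↔
        (RootEq res x y ∨ ((Rt res x a ∨ Rt res x b) ∧ (Rt res y a ∨ Rt res y b)))) := by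
  have hlen : (res.length : Int) = (n : Int) := by exact_mod_cast congrArg Nat.cast hinv.1
  have hget : ∀ m : Int, InRg n m →
      PySem.List.pyGetD (PySem.List.pySetD res b a) m 0 =
        if m = b then a else PySem.List.pyGetD res m 0 := by
    intro m hm
    exact pyGetD_pySetD' res b a m hb.1 (by rw [hlen]; exact hb.2) hm.1 (by rw [hlen]; exact hm.2)
  have hattach : ∀ z : Int, InRg n z → ∀ r : Int, Rt res z r →
      Rt (PySem.List.pySetD res b a) z (if r = b then a else r) := by
    rintro z hz r ⟨l, hl⟩
    exact attach_chain hinv hab ha hb hra hrb hz hl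
  constructor
  · refine ⟨?_, ?_, ?_⟩
    · rw [PySem.List.length_pySetD]; exact hinv.1
    · intro x hx
      rw [hget x hx]
      by_cases hxb : x = b
      · rw [if_pos hxb]; exact ha
      · rw [if_neg hxb]; exact hinv.2.1 x hx
    · intro x hx
      obtain ⟨r, l, hl⟩ := hinv.2.2 x hx
      obtain ⟨l2, hl2⟩ := hattach x hx r ⟨l, hl⟩
      exact ⟨_, l2, hl2⟩
  · intro x y hx hy
    obtain ⟨rx, lx, hlx⟩ := hinv.2.2 x hx
    obtain ⟨ry, ly, hly⟩ := hinv.2.2 y hy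
    have hx2 := hattach x hx rx ⟨lx, hlx⟩
    have hy2 := hattach y hy ry ⟨ly, hly⟩
    constructor
    · rintro ⟨r, hu, hv⟩
      have e1 := rt_unique hu hx2
      have e2 := rt_unique hv hy2
      have key : (if rx = b then a else rx) = (if ry = b then a else ry) := by rw [← e1, ← e2]
      by_cases hxy : rx = ry
      · exact Or.inl ⟨rx, ⟨lx, hlx⟩, hxy ▸ ⟨ly, hly⟩⟩
      · right
        by_cases h1 : rx = b <;> by_cases h2 : ry = b
        · exact absurd (h1.trans h2.symm) hxy
        · rw [if_pos h1, if_neg h2] at key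
          exact ⟨Or.inr ⟨lx, h1 ▸ hlx⟩, Or.inl ⟨ly, key ▸ hly⟩⟩
        · rw [if_neg h1, if_pos h2] at key
          exact ⟨Or.inl ⟨lx, key ▸ hlx⟩, Or.inr ⟨ly, h2 ▸ hly⟩⟩
        · rw [if_neg h1, if_neg h2] at key
          exact absurd key hxy
    · rintro (⟨r, ⟨lu, hlu⟩, ⟨lv, hlv⟩⟩ | ⟨hu, hv⟩)
      · obtain ⟨l1, h1⟩ := hattach x hx r ⟨lu, hlu⟩
        obtain ⟨l2, h2⟩ := hattach y hy r ⟨lv, hlv⟩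
        exact ⟨_, ⟨l1, h1⟩, ⟨l2, h2⟩⟩
      · have key : ∀ z : Int, InRg n z → (Rt res z a ∨ Rt res z b) →
            Rt (PySem.List.pySetD res b a) z a := by
          rintro z hz (h0 | h0)
          · have := hattach z hz a h0
            rwa [if_neg hab] at this
          · have := hattach z hz b h0
            rwa [if_pos rfl] at this
        exact ⟨a, key x hx hu, key y hy hv⟩

theorem union_spec {n : Nat} {res : List Int} (rank : List Int) {x y : Int}
    (hinv : UFInv n res) (hx : InRg n x) (hy : InRg n y) :
    UFInv n (unionA res rank x y (n + 1)).2.1 ∧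
    (((unionA res rank x y (n + 1)).1 = false ∧ RootEq res x y ∧
        (∀ u v : Int, InRg n u → InRg n v →
          (RootEq (unionA res rank x y (n + 1)).2.1 u v ↔ RootEq res u v))) ∨
     ((unionA res rank x y (n + 1)).1 = true ∧ ¬ RootEq res x y ∧
        (∀ u v : Int, InRg n u → InRg n v →
          (RootEq (unionA res rank x y (n + 1)).2.1 u v ↔
            (RootEq res u v ∨ ((RootEq res u x ∨ RootEq res u y) ∧
                               (RootEq res v x ∨ RootEq res v y))))))) := by
  obtain ⟨rx, lx, hlx⟩ := hinv.2.2 x hx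
  have h1 := findA_spec hinv hx hlx (n + 1) (le_trans (chain_length_le hinv hx hlx) (by omega))
  rcases hE1 : findA res x (n + 1) with ⟨fx, res1⟩
  rw [hE1] at h1
  obtain ⟨hfx, hpok1⟩ := h1
  simp only at hfx hpok1
  subst hfx
  obtain ⟨hinv1, -⟩ := rooteq_of_POK hinv hpok1
  obtain ⟨ry, ly0, hly0⟩ := hinv.2.2 y hy
  obtain ⟨ly, hly⟩ := roots_preserved hinv hpok1 hy hly0
  have h2 := findA_spec hinv1 hy hly (n + 1) (le_trans (chain_length_le hinv1 hy hly) (by omega))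
  rcases hE2 : findA res1 y (n + 1) with ⟨fy, res2⟩
  rw [hE2] at h2
  obtain ⟨hfy, hpok2⟩ := h2
  simp only at hfy hpok2
  subst hfy
  have hpok12 : POK n res res2 := POK_trans hinv hpok1 hpok2
  obtain ⟨hinv2, hrel2⟩ := rooteq_of_POK hinv hpok12
  have hx2 : Rt res2 x fx := roots_preserved hinv hpok12 hx hlx
  have hy2 : Rt res2 y fy := roots_preserved hinv hpok12 hy hly0
  have hfx_rg : InRg n fx := chain_mem_rg hinv hx hlx fx (chain_head_mem hlx).2
  have hfy_rg : InRg n fy := chain_mem_rg hinv hy hly0 fy (chain_head_mem hly0).2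
  have hrootx : PySem.List.pyGetD res2 fx 0 = fx := by
    obtain ⟨l2, hl2⟩ := hx2; exact chain_root_fix hl2
  have hrooty : PySem.List.pyGetD res2 fy 0 = fy := by
    obtain ⟨l2, hl2⟩ := hy2; exact chain_root_fix hl2
  have hux : ∀ u : Int, InRg n u → (Rt res2 u fx ↔ RootEq res u x) := by
    intro u hu
    constructor
    · intro h0
      exact (hrel2 u x hu hx).mp ⟨fx, h0, hx2⟩
    · intro h0
      obtain ⟨r, hu', hx'⟩ := (hrel2 u x hu hx).mpr h0
      exact (rt_unique hx' hx2) ▸ hu'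
  have huy : ∀ u : Int, InRg n u → (Rt res2 u fy ↔ RootEq res u y) := by
    intro u hu
    constructor
    · intro h0
      exact (hrel2 u y hu hy).mp ⟨fy, h0, hy2⟩
    · intro h0
      obtain ⟨r, hu', hy'⟩ := (hrel2 u y hu hy).mpr h0
      exact (rt_unique hy' hy2) ▸ hu'
  by_cases hroot : fx = fy
  · simp only [unionA, hE1, hE2, if_pos hroot]
    refine ⟨hinv2, Or.inl ⟨trivial, ⟨fx, ⟨lx, hlx⟩, hroot ▸ ⟨ly0, hly0⟩⟩, ?_⟩⟩
    intro u v hu hv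
    exact hrel2 u v hu hv
  · simp only [unionA, hE1, hE2, if_neg hroot]
    have hne : ¬ RootEq res x y := by
      rintro ⟨r, hu, hv⟩
      exact hroot ((rt_unique hu ⟨lx, hlx⟩).symm.trans (rt_unique hv ⟨ly0, hly0⟩))
    by_cases hr : PySem.List.pyGetD rank fx 0 < PySem.List.pyGetD rank fy 0
    · simp only [if_pos hr]
      have hat := attach_spec hinv2 (Ne.symm hroot) hfy_rg hfx_rg hrooty hrootx
      refine ⟨hat.1, Or.inr ⟨trivial, hne, ?_⟩⟩
      intro u v hu hv
      rw [hat.2 u v hu hv, hrel2 u v hu hv]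
      rw [show (Rt res2 u fy ∨ Rt res2 u fx) ↔ (RootEq res u x ∨ RootEq res u y) by
            rw [hux u hu, huy u hu]; exact or_comm,
          show (Rt res2 v fy ∨ Rt res2 v fx) ↔ (RootEq res v x ∨ RootEq res v y) by
            rw [hux v hv, huy v hv]; exact or_comm]
    · simp only [if_neg hr]
      have hat := attach_spec hinv2 hroot hfx_rg hfy_rg hrootx hrooty
      refine ⟨hat.1, Or.inr ⟨trivial, hne, ?_⟩⟩
      intro u v hu hv
      rw [hat.2 u v hu hv, hrel2 u v hu hv]
      rw [show (Rt res2 u fx ∨ Rt res2 u fy) ↔ (RootEq res u x ∨ RootEq res u y) by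
            rw [hux u hu, huy u hu],
          show (Rt res2 v fx ∨ Rt res2 v fy) ↔ (RootEq res v x ∨ RootEq res v y) by
            rw [hux v hv, huy v hv]]

-- B's state simulates A's: components agree as partitions of [0, n)
def Sim (n : Nat) (res comp : List Int) : Prop :=
  UFInv n res ∧ comp.length = n ∧
  ∀ x y : Int, InRg n x → InRg n y →
    (RootEq res x y ↔ PySem.List.pyGetD comp x 0 = PySem.List.pyGetD comp y 0)

theorem pyGetD_map_if (comp : List Int) (f : Int → Int) (z : Int)
    (h0 : 0 ≤ z) (h1 : z < (comp.length : Int)) :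
    PySem.List.pyGetD (comp.map f) z 0 = f (PySem.List.pyGetD comp z 0) := by
  rw [PySem.List.pyGetD_eq_getElem (comp.map f) h0 (by simpa using h1) (d := (0:Int)),
      PySem.List.pyGetD_eq_getElem comp h0 (by simpa using h1) (d := (0:Int))]
  simp

theorem loop_eq {n : Nat} : ∀ (es : List (Int × Int × Int)) (res rank comp : List Int)
    (ret nums : Int), Sim n res comp →
    (∀ e ∈ es, InRg n e.2.1 ∧ InRg n e.2.2) →
    loopA n es res rank ret nums = loopB n es comp ret nums := by
  intro es
  induction es with
  | nil => intro res rank comp ret nums _ _; rfl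
  | cons e rest ih =>
    intro res rank comp ret nums hsim hb
    obtain ⟨d, x, y⟩ := e
    have hx : InRg n x := (hb _ List.mem_cons_self).1
    have hy : InRg n y := (hb _ List.mem_cons_self).2
    have hbt : ∀ e ∈ rest, InRg n e.2.1 ∧ InRg n e.2.2 :=
      fun e he => hb e (List.mem_cons_of_mem _ he)
    have hu := union_spec rank hsim.1 hx hy
    have hclen : (comp.length : Int) = (n : Int) := by exact_mod_cast congrArg Nat.cast hsim.2.1
    rcases hu.2 with ⟨hfalse, hre, hrel⟩ | ⟨htrue, hre, hrel⟩
    · have hci : PySem.List.pyGetD comp x 0 = PySem.List.pyGetD comp y 0 :=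
        (hsim.2.2 x y hx hy).mp hre
      simp only [loopA, loopB, hfalse, hci, if_pos, Bool.false_eq_true, if_false]
      exact ih _ _ comp ret nums
        ⟨hu.1, hsim.2.1, fun a b ha hb' => (hrel a b ha hb').trans (hsim.2.2 a b ha hb')⟩ hbt
    · have hci : ¬ (PySem.List.pyGetD comp x 0 = PySem.List.pyGetD comp y 0) :=
        fun h => hre ((hsim.2.2 x y hx hy).mpr h)
      simp only [loopA, loopB, htrue, if_neg hci, if_true]
      by_cases hn : nums + 1 = (n : Int)
      · rw [if_pos hn, if_pos hn]
      · rw [if_neg hn, if_neg hn]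
        refine ih _ _ _ _ _ ⟨hu.1, by simpa using hsim.2.1, ?_⟩ hbt
        intro a b ha hb'
        rw [hrel a b ha hb', hsim.2.2 a b ha hb', hsim.2.2 a x ha hx, hsim.2.2 a y ha hy,
            hsim.2.2 b x hb' hx, hsim.2.2 b y hb' hy]
        rw [pyGetD_map_if comp _ a ha.1 (by rw [hclen]; exact ha.2),
            pyGetD_map_if comp _ b hb'.1 (by rw [hclen]; exact hb'.2)]
        split_ifs <;> constructor <;> intro h' <;> omega

theorem sim_init (n : Nat) :
    Sim n (PySem.List.pyRange 0 (n : Int) 1) (PySem.List.pyRange 0 (n : Int) 1) := by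
  have hlen : (PySem.List.pyRange 0 (n : Int) 1).length = n := by
    rw [PySem.List.length_pyRange_one]; omega
  have hget : ∀ x : Int, InRg n x → PySem.List.pyGetD (PySem.List.pyRange 0 (n : Int) 1) x 0 = x := by
    intro x hx
    rw [PySem.List.pyGetD_eq_getElem _ hx.1 (by rw [hlen]; exact_mod_cast hx.2) (d := (0:Int))]
    rw [PySem.List.getElem_pyRange_one]
    have hx0 : (0:Int) ≤ x := hx.1
    omega
  refine ⟨⟨hlen, ?_, ?_⟩, hlen, ?_⟩
  · intro x hx
    rw [hget x hx]; exact hx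
  · intro x hx
    exact ⟨x, [x], ChainU.root _ x (hget x hx)⟩
  · intro x y hx hy
    rw [hget x hx, hget y hy]
    constructor
    · rintro ⟨r, hu, hv⟩
      have e1 := rt_unique hu ⟨[x], ChainU.root _ x (hget x hx)⟩
      have e2 := rt_unique hv ⟨[y], ChainU.root _ y (hget y hy)⟩
      rw [← e1, ← e2]
    · intro h
      subst h
      exact ⟨x, ⟨[x], ChainU.root _ x (hget x hx)⟩, ⟨[x], ChainU.root _ x (hget x hx)⟩⟩

-- ===== VERDICT (by name: the statement is the Claim_ definition above) =====
theorem minCostConnectPoints_spec : Claim_equal_minCostConnectPoints := by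
  intro points hdom hpre
  unfold Spec_minCostConnectPoints
  simp only [minCostConnectPoints, minCostConnectPoints_alt]
  have hgen : (PySem.List.pyRange 0 (points.length : Int) 1).foldl (fun acc i =>
      (PySem.List.pyRange (i + 1) (points.length : Int) 1).foldl (fun acc2 j =>
        acc2 ++ [(distA points i j, i, j)]) acc) [] =
      (PySem.List.pyRange 0 (points.length : Int) 1).flatMap (fun i =>
      (PySem.List.pyRange (i + 1) (points.length : Int) 1).map (fun j =>
        (distB points i j, i, j))) := by
    simp only [PySem.List.foldl_append_singleton_eq_map]
    rw [PySem.List.foldl_append_eq_flatMap]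
    simp only [List.nil_append, distA, distB]
  rw [hgen]
  refine loop_eq _ _ _ _ _ _ (sim_init points.length) ?_
  intro e he
  have hp : e ∈ (PySem.List.pyRange 0 (points.length : Int) 1).flatMap (fun i =>
      (PySem.List.pyRange (i + 1) (points.length : Int) 1).map (fun j =>
        (distB points i j, i, j))) := (PySem.List.sorted2_perm _ _ _ _).mem_iff.mp he
  rcases List.mem_flatMap.mp hp with ⟨i, hi, hm⟩
  rcases List.mem_map.mp hm with ⟨j, hj, rfl⟩
  rcases PySem.List.mem_pyRange_one.mp hi with ⟨hi0, hi1⟩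
  rcases PySem.List.mem_pyRange_one.mp hj with ⟨hj0, hj1⟩
  exact ⟨⟨hi0, hi1⟩, ⟨by show (0:Int) ≤ j; omega, hj1⟩⟩
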